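-- pv_equiv track=rewrite | github.com/Shameel17/30DaysOfPython | day7,8,9/q3.py | calculate_manhattan_distance
-- ===== SOURCE A (Python) =====
-- def calculate_manhattan_distance(sequence):
--     x, y = 0, 0
--     for move in sequence:
--         if move == 'UP':
--             y += 1
--         elif move == 'DOWN':
--             y -= 1
--         elif move == 'LEFT':
--             x -= 1
--         elif move == 'RIGHT':
--             x += 1
--     manhattan_distance = abs(x) + abs(y)
--     return manhattan_distance
-- ===== SOURCE B (Python) =====
-- def calculate_manhattan_distance(sequence):
--     moves = list(sequence)
--     return abs(moves.count('RIGHT') - moves.count('LEFT')) + \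
--            abs(moves.count('UP') - moves.count('DOWN'))
-- ===== Notes on version B (the rewrite author's own statement) =====
-- stated objective: simpler
-- what changed: Replaces the single stateful pass with an if/elif cascade updating (x,y) by four independent list.count scans (one per direction token) combined arithmetically; no coordinate state or branching is maintained.
import Mathlib
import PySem

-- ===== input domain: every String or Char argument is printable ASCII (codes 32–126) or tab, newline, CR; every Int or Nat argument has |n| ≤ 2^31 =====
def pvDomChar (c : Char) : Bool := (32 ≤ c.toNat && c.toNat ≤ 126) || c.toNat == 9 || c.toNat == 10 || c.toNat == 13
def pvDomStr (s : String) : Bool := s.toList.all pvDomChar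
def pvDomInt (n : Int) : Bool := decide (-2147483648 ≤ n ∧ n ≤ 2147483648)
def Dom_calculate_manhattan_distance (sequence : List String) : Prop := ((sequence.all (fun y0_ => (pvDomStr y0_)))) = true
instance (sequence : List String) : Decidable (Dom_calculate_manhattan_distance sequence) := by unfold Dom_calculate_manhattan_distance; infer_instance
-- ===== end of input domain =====

-- B replaces A's single stateful pass with its if/elif cascade by four independent list.count scans combined arithmetically (objective: simpler).

-- ===== PORT A =====
def calculate_manhattan_distance (sequence : List String) : Int :=
  let xy := sequence.foldl (fun (st : Int × Int) move =>
    if move == "UP" then (st.1, st.2 + 1)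
    else if move == "DOWN" then (st.1, st.2 - 1)
    else if move == "LEFT" then (st.1 - 1, st.2)
    else if move == "RIGHT" then (st.1 + 1, st.2)
    else st) (0, 0)
  |xy.1| + |xy.2|

-- ===== PORT B =====
def calculate_manhattan_distance_alt (sequence : List String) : Int :=
  let moves := sequence
  |(PySem.List.count moves "RIGHT" : Int) - (PySem.List.count moves "LEFT" : Int)| +
  |(PySem.List.count moves "UP" : Int) - (PySem.List.count moves "DOWN" : Int)|

-- ===== PRECONDITION & SPEC =====
def Spec_calculate_manhattan_distance (sequence : List String) (out : Int) : Prop := out = calculate_manhattan_distance_alt sequence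
instance (sequence : List String) (out : Int) : Decidable (Spec_calculate_manhattan_distance sequence out) := by unfold Spec_calculate_manhattan_distance; infer_instance

-- ===== CLAIM (what is proved, stated in full; the proofs are below) =====
def Claim_equal_calculate_manhattan_distance : Prop := ∀ (sequence : List String), Dom_calculate_manhattan_distance sequence → Spec_calculate_manhattan_distance sequence (calculate_manhattan_distance sequence)

-- ===== LEMMAS AND PROOFS =====

-- A's loop invariant: the fold's state is (x₀ + #RIGHT − #LEFT, y₀ + #UP − #DOWN) over the processed list.
theorem pv_foldl_counts (l : List String) (x y : Int) :
    l.foldl (fun (st : Int × Int) move =>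
      if move == "UP" then (st.1, st.2 + 1)
      else if move == "DOWN" then (st.1, st.2 - 1)
      else if move == "LEFT" then (st.1 - 1, st.2)
      else if move == "RIGHT" then (st.1 + 1, st.2)
      else st) (x, y)
    = (x + l.count "RIGHT" - l.count "LEFT", y + l.count "UP" - l.count "DOWN") := by
  induction l generalizing x y with
  | nil => simp
  | cons h t ih =>
    rw [List.foldl_cons]
    by_cases hU : h = "UP"
    · subst hU
      rw [if_pos (by decide), ih]
      simp only [List.count_cons, Prod.mk.injEq]
      constructor <;> (simp; try omega)
    · by_cases hD : h = "DOWN"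
      · subst hD
        rw [if_neg (by decide), if_pos (by decide), ih]
        simp only [List.count_cons, Prod.mk.injEq]
        constructor <;> (simp; try omega)
      · by_cases hL : h = "LEFT"
        · subst hL
          rw [if_neg (by decide), if_neg (by decide), if_pos (by decide), ih]
          simp only [List.count_cons, Prod.mk.injEq]
          constructor <;> (simp; try omega)
        · by_cases hR : h = "RIGHT"
          · subst hR
            rw [if_neg (by decide), if_neg (by decide), if_neg (by decide), if_pos (by decide), ih]
            simp only [List.count_cons, Prod.mk.injEq]
            constructor <;> (simp; try omega)
          · rw [if_neg (by simp [hU]), if_neg (by simp [hD]), if_neg (by simp [hL]), if_neg (by simp [hR]), ih]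
            simp [hU, hD, hL, hR]

-- ===== VERDICT (by name: the statement is the Claim_ definition above) =====
theorem calculate_manhattan_distance_spec : Claim_equal_calculate_manhattan_distance := by
  intro sequence _
  unfold Spec_calculate_manhattan_distance calculate_manhattan_distance calculate_manhattan_distance_alt
  simp only [pv_foldl_counts, PySem.List.count_eq]
  ring_nf
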